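-- pv_equiv track=rewrite | github.com/McGill-NLP/VinePPO | src/treetune/tasks/math_extract_steps.py | merge_short_parts_forward
-- ===== SOURCE A (Python) =====
-- import copy
--
-- def merge_short_parts_forward(parts):
--     # Merge short parts with the next part
--     parts = copy.deepcopy(parts)
--     i = 0
--     while i < len(parts) - 1:
--         if not parts[i].endswith(".") and len(parts[i]) < 20:
--             parts[i] = parts[i].rstrip() + " " + parts.pop(i + 1).lstrip()
--         else:
--             i += 1
--
--     return parts
-- ===== SOURCE B (Python) =====
-- def merge_short_parts_forward(parts):
--     # Single forward pass with an accumulator; no deepcopy, no list pops.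
--     out = []
--     acc = None
--     for p in parts:
--         if acc is None:
--             acc = p
--         elif not acc.endswith(".") and len(acc) < 20:
--             acc = acc.rstrip() + " " + p.lstrip()
--         else:
--             out.append(acc)
--             acc = p
--     if acc is not None:
--         out.append(acc)
--     return out
-- ===== Notes on version B (the rewrite author's own statement) =====
-- stated objective: faster
-- what changed: Replaces the while-loop that repeatedly pops the next element out of the list (each pop shifts the tail, O(n^2)) with a single forward pass keeping one accumulator string and appending finished parts to an output list, O(total length).
import Mathlib
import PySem

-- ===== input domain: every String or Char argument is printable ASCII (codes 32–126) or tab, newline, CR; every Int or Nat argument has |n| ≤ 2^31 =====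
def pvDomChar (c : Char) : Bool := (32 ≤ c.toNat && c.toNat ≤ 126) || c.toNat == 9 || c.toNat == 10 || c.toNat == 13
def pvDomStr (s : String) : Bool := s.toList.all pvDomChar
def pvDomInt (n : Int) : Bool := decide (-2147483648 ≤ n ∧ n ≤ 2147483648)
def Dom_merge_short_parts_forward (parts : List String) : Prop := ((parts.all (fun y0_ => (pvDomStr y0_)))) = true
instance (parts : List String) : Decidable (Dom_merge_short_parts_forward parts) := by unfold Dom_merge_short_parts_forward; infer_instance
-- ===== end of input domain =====

-- B replaces A's pop-in-place while-loop with a single forward pass and an accumulator (faster); return value only — A deep-copies its argument, so neither mutates.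

-- ===== PORT A =====
-- A's while-loop: state is the (shrinking) list and index i; parts[i] read, parts.pop(i+1), parts[i] = merged
def mspfA_loop (parts : List String) (i : Nat) : List String :=
  if h : i + 1 < parts.length then
    let p := parts.getD i ""
    if PySem.Str.endswith p "." = false ∧ PySem.Str.len p < 20 then
      let q := parts.getD (i + 1) ""
      mspfA_loop ((parts.set i (PySem.Str.rstrip p ++ " " ++ PySem.Str.lstrip q)).eraseIdx (i + 1)) i
    else
      mspfA_loop parts (i + 1)
  else parts
termination_by parts.length - i
decreasing_by
  · simp only [List.length_eraseIdx, List.length_set, if_pos h]; omega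
  · omega

def merge_short_parts_forward (parts : List String) : List String :=
  mspfA_loop parts 0

-- ===== PORT B =====
-- loop body of Source B: state is (out, acc); acc = None before the first element
def mspfB_step (st : List String × Option String) (p : String) : List String × Option String :=
  match st.2 with
  | none => (st.1, some p)
  | some acc =>
    if PySem.Str.endswith acc "." = false ∧ PySem.Str.len acc < 20 then
      (st.1, some (PySem.Str.rstrip acc ++ " " ++ PySem.Str.lstrip p))
    else
      (st.1 ++ [acc], some p)

def merge_short_parts_forward_alt (parts : List String) : List String :=
  match parts.foldl mspfB_step ([], none) with
  | (out, none) => out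
  | (out, some acc) => out ++ [acc]

-- ===== PRECONDITION & SPEC =====
def Spec_merge_short_parts_forward (parts : List String) (out : List String) : Prop := out = merge_short_parts_forward_alt parts
instance (parts : List String) (out : List String) : Decidable (Spec_merge_short_parts_forward parts out) := by unfold Spec_merge_short_parts_forward; infer_instance

-- ===== CLAIM (what is proved, stated in full; the proofs are below) =====
def Claim_equal_merge_short_parts_forward : Prop := ∀ (parts : List String), Dom_merge_short_parts_forward parts → Spec_merge_short_parts_forward parts (merge_short_parts_forward parts)

-- ===== LEMMAS AND PROOFS =====

-- the one-pass recursion both sides reduce to: acc is the part under construction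
def mspfSpine (acc : String) : List String → List String
  | [] => [acc]
  | p :: rest =>
    if PySem.Str.endswith acc "." = false ∧ PySem.Str.len acc < 20 then
      mspfSpine (PySem.Str.rstrip acc ++ " " ++ PySem.Str.lstrip p) rest
    else
      acc :: mspfSpine p rest

lemma eraseIdx_mid (front : List String) (v p : String) (l : List String) :
    (front ++ v :: p :: l).eraseIdx (front.length + 1) = front ++ v :: l := by
  induction front with
  | nil => simp
  | cons a t ih => simpa using ih

lemma mspfB_foldl (rest : List String) : ∀ (out : List String) (acc : String),
    (match rest.foldl mspfB_step (out, some acc) with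
     | (o, none) => o
     | (o, some a) => o ++ [a]) = out ++ mspfSpine acc rest := by
  induction rest with
  | nil => intro out acc; simp [mspfSpine]
  | cons p rest ih =>
    intro out acc
    rw [List.foldl_cons]
    have hstep : mspfB_step (out, some acc) p =
        if PySem.Str.endswith acc "." = false ∧ PySem.Str.len acc < 20 then
          (out, some (PySem.Str.rstrip acc ++ " " ++ PySem.Str.lstrip p))
        else (out ++ [acc], some p) := rfl
    have hs : mspfSpine acc (p :: rest) =
        if PySem.Str.endswith acc "." = false ∧ PySem.Str.len acc < 20 then
          mspfSpine (PySem.Str.rstrip acc ++ " " ++ PySem.Str.lstrip p) rest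
        else acc :: mspfSpine p rest := rfl
    rw [hstep, hs]
    by_cases hc : PySem.Str.endswith acc "." = false ∧ PySem.Str.len acc < 20
    · rw [if_pos hc, if_pos hc]
      exact ih out _
    · rw [if_neg hc, if_neg hc, ih (out ++ [acc]) p]
      simp

lemma mspfA_spine (rest : List String) : ∀ (front : List String) (acc : String),
    mspfA_loop (front ++ acc :: rest) front.length = front ++ mspfSpine acc rest := by
  induction rest with
  | nil =>
    intro front acc
    rw [mspfA_loop]
    simp [mspfSpine]
  | cons p rest ih =>
    intro front acc
    rw [mspfA_loop]
    have hlen : front.length + 1 < (front ++ acc :: p :: rest).length := by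
      simp
    rw [dif_pos hlen]
    have hget : (front ++ acc :: p :: rest).getD front.length "" = acc := by
      simp [List.getD_eq_getElem?_getD]
    have hget1 : (front ++ acc :: p :: rest).getD (front.length + 1) "" = p := by
      have h2 : front ++ acc :: p :: rest = (front ++ [acc]) ++ p :: rest := by simp
      have hl : front.length + 1 = (front ++ [acc]).length := by simp
      rw [h2, hl]
      simp [List.getD_eq_getElem?_getD]
    simp only [hget, hget1]
    have hs : mspfSpine acc (p :: rest) =
        if PySem.Str.endswith acc "." = false ∧ PySem.Str.len acc < 20 then
          mspfSpine (PySem.Str.rstrip acc ++ " " ++ PySem.Str.lstrip p) rest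
        else acc :: mspfSpine p rest := rfl
    rw [hs]
    by_cases hc : PySem.Str.endswith acc "." = false ∧ PySem.Str.len acc < 20
    · rw [if_pos hc]
      have hset : (front ++ acc :: p :: rest).set front.length
          (PySem.Str.rstrip acc ++ " " ++ PySem.Str.lstrip p) =
          front ++ (PySem.Str.rstrip acc ++ " " ++ PySem.Str.lstrip p) :: p :: rest := by
        simp
      rw [if_pos hc, hset, eraseIdx_mid, ih front _]
    · rw [if_neg hc]
      have hre : front ++ acc :: p :: rest = (front ++ [acc]) ++ p :: rest := by simp
      have hl : front.length + 1 = (front ++ [acc]).length := by simp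
      rw [hre, hl, ih (front ++ [acc]) p]
      unfold mspfSpine
      rw [if_neg hc]
      simp

-- ===== VERDICT (by name: the statement is the Claim_ definition above) =====
theorem merge_short_parts_forward_spec : Claim_equal_merge_short_parts_forward := by
  intro parts _
  unfold Spec_merge_short_parts_forward merge_short_parts_forward merge_short_parts_forward_alt
  cases parts with
  | nil => rw [mspfA_loop]; simp
  | cons a rest =>
    have hA := mspfA_spine rest [] a
    have hB := mspfB_foldl rest [] a
    simp only [List.nil_append] at hA hB
    rw [List.foldl_cons]
    show mspfA_loop (a :: rest) 0 =
      (match rest.foldl mspfB_step (mspfB_step ([], none) a) with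
       | (o, none) => o
       | (o, some x) => o ++ [x])
    rw [show mspfB_step ([], none) a = ([], some a) from rfl]
    rw [hB]
    exact hA
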